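-- pv_equiv track=rewrite | github.com/joshanashakya/dissertation | workspace/dataset/java-python/GeeksForGeeks/3768/A/2.py | minReplace
-- ===== SOURCE A (Python) =====
-- def minReplace(a: list, n) -> int:
--
--     # Map to store the frequency of
--     # the numbers at the even indices
--     te = dict()
--
--     # Map to store the frequency of
--     # the numbers at the odd indices
--     to = dict()
--
--     for i in range(n):
--
--         # Checking if the index
--         # is odd or even
--         if i % 2 == 0:
--
--             # If the number is already present then,
--             # just increase the occurrence by 1
--             if a[i] not in te:
--                 te[a[i]] = 1
--             else:
--                 te[a[i]] += 1
--         else: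
--
--             # If the number is already present then,
--             # just increase the occurrence by 1
--             if a[i] not in to:
--                 to[a[i]] = 1
--             else:
--                 to[a[i]] += 1
--
--     # To store the character with
--     # maximum frequency in even indices.
--     me = -1
--
--     # To store the character with
--     # maximum frequency in odd indices.
--     mo = -1
--
--     # To store the frequency of the
--     # maximum occurring number in even indices.
--     ce = -1
--
--     # To store the frequency of the
--     # maximum occurring number in odd indices.
--     co = -1
--
--     # Iterating over Map of even indices to
--     # get the maximum occurring number.
--     for it in te:
--         if te[it] > ce:
--             ce = te[it]
--             me = it
--
--     # Iterating over Map of odd indices to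
--     # get the maximum occurring number.
--     for it in to:
--         if to[it] > co:
--             co = to[it]
--             mo = it
--
--     # To store the final answer
--     res = 0
--
--     for i in range(n):
--         if i % 2 == 0:
--
--             # If the index is even but
--             # a[i] != me
--             # then a[i] needs to be replaced
--             if a[i] != me:
--                 res += 1
--         else:
--
--             # If the index is odd but
--             # a[i] != mo
--             # then a[i] needs to be replaced
--             if a[i] != mo:
--                 res += 1
--
--     return res
-- ===== SOURCE B (Python) =====
-- def _longest_run(xs):
--     # xs is sorted, so equal values are contiguous: the longest run of one
--     # value is exactly the maximum multiplicity.
--     best = 0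
--     cur = 0
--     prev = None
--     for x in xs:
--         if prev is not None and x == prev:
--             cur += 1
--         else:
--             cur = 1
--         if cur > best:
--             best = cur
--         prev = x
--     return best
--
--
-- def minReplace(a: list, n) -> int:
--     ev = sorted(a[i] for i in range(0, n, 2))
--     od = sorted(a[i] for i in range(1, n, 2))
--     return (len(ev) - _longest_run(ev)) + (len(od) - _longest_run(od))
-- ===== Notes on version B (the rewrite author's own statement) =====
-- stated objective: alternative
-- what changed: B drops A's dictionaries entirely: it sorts the even-index and odd-index elements and finds each parity's maximum multiplicity as the longest run of equal values in the sorted list, returning (len(even)-run_even)+(len(odd)-run_odd) in closed form instead of A's three dict passes (interleaved counting, argmax with -1 sentinels, mismatch recount).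
import Mathlib
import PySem

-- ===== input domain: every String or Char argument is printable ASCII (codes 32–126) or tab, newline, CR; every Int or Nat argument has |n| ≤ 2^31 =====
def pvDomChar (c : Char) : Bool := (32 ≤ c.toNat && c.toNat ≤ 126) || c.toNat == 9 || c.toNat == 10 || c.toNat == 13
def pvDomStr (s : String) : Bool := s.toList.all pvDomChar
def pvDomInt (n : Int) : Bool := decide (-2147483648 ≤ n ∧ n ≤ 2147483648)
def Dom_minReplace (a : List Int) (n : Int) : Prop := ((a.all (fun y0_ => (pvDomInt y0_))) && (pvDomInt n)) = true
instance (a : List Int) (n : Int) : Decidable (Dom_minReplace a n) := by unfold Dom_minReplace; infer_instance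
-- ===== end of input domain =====

-- B replaces A's dict-based strategy (interleaved frequency counting, argmax with -1
-- sentinels, and a final mismatch-counting pass) by sorting each parity class and
-- scanning the sorted list for the longest run of equal values.  Objective: alternative.

-- ===== PORT A =====
def minReplace (a : List Int) (n : Int) : Int :=
  let teto := (PySem.List.pyRange 0 n 1).foldl
    (fun (s : PySem.Dict Int Int × PySem.Dict Int Int) i =>
      if PySem.Int.mod i 2 == 0 then
        (if !(s.1.contains (PySem.List.pyGetD a i 0)) then
            s.1.insert (PySem.List.pyGetD a i 0) 1
         else
            s.1.insert (PySem.List.pyGetD a i 0) (s.1.getD (PySem.List.pyGetD a i 0) 0 + 1), s.2)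
      else
        (s.1,
         if !(s.2.contains (PySem.List.pyGetD a i 0)) then
            s.2.insert (PySem.List.pyGetD a i 0) 1
         else
            s.2.insert (PySem.List.pyGetD a i 0) (s.2.getD (PySem.List.pyGetD a i 0) 0 + 1)))
    (PySem.Dict.empty, PySem.Dict.empty)
  let te := teto.1
  let tod := teto.2
  let ceme := te.keys.foldl
    (fun (p : Int × Int) it => if te.getD it 0 > p.1 then (te.getD it 0, it) else p) (-1, -1)
  let como := tod.keys.foldl
    (fun (p : Int × Int) it => if tod.getD it 0 > p.1 then (tod.getD it 0, it) else p) (-1, -1)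
  (PySem.List.pyRange 0 n 1).foldl
    (fun res i =>
      if PySem.Int.mod i 2 == 0 then
        (if PySem.List.pyGetD a i 0 ≠ ceme.2 then res + 1 else res)
      else
        (if PySem.List.pyGetD a i 0 ≠ como.2 then res + 1 else res)) 0

-- ===== PORT B =====
-- loop body of _longest_run: state (best, cur, prev)
def lrStep (s : Int × Int × Option Int) (x : Int) : Int × Int × Option Int :=
  let cur := if s.2.2 = some x then s.2.1 + 1 else 1
  (if cur > s.1 then cur else s.1, cur, some x)

-- _longest_run(xs): longest run of equal adjacent values
def longestRun (xs : List Int) : Int := (xs.foldl lrStep (0, 0, none)).1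

def minReplace_alt (a : List Int) (n : Int) : Int :=
  let ev := PySem.List.sorted ((PySem.List.pyRange 0 n 2).map (fun i => PySem.List.pyGetD a i 0)) (fun x => x) false
  let od := PySem.List.sorted ((PySem.List.pyRange 1 n 2).map (fun i => PySem.List.pyGetD a i 0)) (fun x => x) false
  ((ev.length : Int) - longestRun ev) + ((od.length : Int) - longestRun od)

-- ===== PRECONDITION & SPEC =====
-- Pre_ excludes exactly the inputs with n > len(a), on which both programs raise IndexError.
def Pre_minReplace (a : List Int) (n : Int) : Prop := n ≤ (a.length : Int)
instance (a : List Int) (n : Int) : Decidable (Pre_minReplace a n) := by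
  unfold Pre_minReplace; infer_instance

def pvWitness_minReplace : List Int × Int := ([1, 2, 1, 3, 1], 5)

def Spec_minReplace (a : List Int) (n : Int) (out : Int) : Prop := out = minReplace_alt a n
instance (a : List Int) (n : Int) (out : Int) : Decidable (Spec_minReplace a n out) := by
  unfold Spec_minReplace; infer_instance

-- ===== CLAIM (what is proved, stated in full; the proofs are below) =====
def Claim_equal_minReplace : Prop := ∀ (a : List Int) (n : Int), Dom_minReplace a n → Pre_minReplace a n → Spec_minReplace a n (minReplace a n)

-- ===== LEMMAS AND PROOFS =====

lemma pv_range_even (m : Nat) :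
    (List.range m).filter (fun k => k % 2 == 0) = (List.range ((m+1)/2)).map (fun k => 2*k) := by
  induction m with
  | zero => simp
  | succ m ih =>
    rw [List.range_succ, List.filter_append, ih]
    rcases Nat.even_or_odd m with h | h
    · obtain ⟨t, rfl⟩ := h
      have h1 : (t + t + 1 + 1) / 2 = (t + t + 1) / 2 + 1 := by omega
      have h2 : (t + t) % 2 = 0 := by omega
      have h3 : 2 * ((t + t + 1) / 2) = t + t := by omega
      rw [h1, List.range_succ, List.map_append]
      simp [h2, h3]
    · obtain ⟨t, rfl⟩ := h
      have h1 : (2*t + 1 + 1 + 1) / 2 = (2*t + 1 + 1) / 2 := by omega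
      have h2 : (2*t + 1) % 2 = 1 := by omega
      rw [h1]
      simp [h2]
lemma pv_range_odd (m : Nat) :
    (List.range m).filter (fun k => !(k % 2 == 0)) = (List.range (m/2)).map (fun k => 2*k+1) := by
  induction m with
  | zero => simp
  | succ m ih =>
    rw [List.range_succ, List.filter_append, ih]
    rcases Nat.even_or_odd m with h | h
    · obtain ⟨t, rfl⟩ := h
      have h1 : (t + t + 1) / 2 = (t + t) / 2 := by omega
      have h2 : (t + t) % 2 = 0 := by omega
      rw [h1]
      simp [h2]
    · obtain ⟨t, rfl⟩ := h
      have h1 : (2*t + 1 + 1) / 2 = (2*t+1) / 2 + 1 := by omega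
      have h2 : (2*t+1) % 2 = 1 := by omega
      have h3 : 2 * ((2*t+1) / 2) + 1 = 2*t+1 := by omega
      rw [h1, List.range_succ, List.map_append]
      simp [h2, h3]
lemma pv_pyRange_one (m : Nat) :
    PySem.List.pyRange 0 (m:Int) 1 = List.map (fun k : Nat => (k : Int)) (List.range m) := by
  rw [PySem.List.pyRange_one]
  simp only [Int.sub_zero, Int.toNat_natCast]
  apply List.map_congr_left
  intro k _
  omega
lemma pv_pyRange_two_zero (m : Nat) :
    PySem.List.pyRange 0 (m:Int) 2 = List.map (fun k : Nat => ((2*k : Nat) : Int)) (List.range ((m+1)/2)) := by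
  rw [PySem.List.pyRange_of_pos 0 (m:Int) (by norm_num : (0:Int) < 2)]
  have h : (if (0:Int) < (m:Int) then (((m:Int) - 0 + 2 - 1) / 2).toNat else 0) = (m+1)/2 := by
    split <;> omega
  rw [h]
  apply List.map_congr_left
  intro k _
  push_cast
  ring
lemma pv_pyRange_two_one (m : Nat) :
    PySem.List.pyRange 1 (m:Int) 2 = List.map (fun k : Nat => ((2*k+1 : Nat) : Int)) (List.range (m/2)) := by
  rw [PySem.List.pyRange_of_pos 1 (m:Int) (by norm_num : (0:Int) < 2)]
  have h : (if (1:Int) < (m:Int) then (((m:Int) - 1 + 2 - 1) / 2).toNat else 0) = m/2 := by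
    split <;> omega
  rw [h]
  apply List.map_congr_left
  intro k _
  push_cast
  ring
lemma pv_filter_even (m : Nat) :
    (PySem.List.pyRange 0 (m:Int) 1).filter (fun i => PySem.Int.mod i 2 == 0) =
      PySem.List.pyRange 0 (m:Int) 2 := by
  rw [pv_pyRange_one, List.filter_map, pv_pyRange_two_zero]
  have h : List.filter ((fun i => PySem.Int.mod i 2 == 0) ∘ (fun k : Nat => (k:Int))) (List.range m)
      = List.filter (fun k => k % 2 == 0) (List.range m) := by
    apply List.filter_congr
    intro k _
    simp only [Function.comp, PySem.Int.mod_eq_emod_of_pos (by norm_num : (0:Int) < 2)]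
    have hc : ((k:Int) % 2) = ((k % 2 : Nat) : Int) := by push_cast; ring
    rw [hc]
    simp
    omega
  rw [h, pv_range_even, List.map_map]
  rfl
lemma pv_filter_odd (m : Nat) :
    (PySem.List.pyRange 0 (m:Int) 1).filter (fun i => !(PySem.Int.mod i 2 == 0)) =
      PySem.List.pyRange 1 (m:Int) 2 := by
  rw [pv_pyRange_one, List.filter_map, pv_pyRange_two_one]
  have h : List.filter ((fun i => !(PySem.Int.mod i 2 == 0)) ∘ (fun k : Nat => (k:Int))) (List.range m)
      = List.filter (fun k => !(k % 2 == 0)) (List.range m) := by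
    apply List.filter_congr
    intro k _
    simp only [Function.comp, PySem.Int.mod_eq_emod_of_pos (by norm_num : (0:Int) < 2)]
    have hc : ((k:Int) % 2) = ((k % 2 : Nat) : Int) := by push_cast; ring
    rw [hc]
    simp
    omega
  rw [h, pv_range_odd, List.map_map]
  rfl

lemma pv_upd_eq (d : PySem.Dict Int Int) (v : Int) :
    (if !(d.contains v) then d.insert v 1 else d.insert v (d.getD v 0 + 1)) =
      d.insert v (d.getD v 0 + 1) := by
  cases h : d.contains v with
  | true => simp [h]
  | false => simp [h, PySem.Dict.getD_of_not_contains d 0 h]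

-- the maximum multiplicity, as A's dict argmax produces it
def pvMc (l : List Int) : Int :=
  PySem.List.maxD ((PySem.Set.ofList l).map (fun k => ((l.count k : Nat) : Int))) (fun v => v) 0

lemma pv_argmax_fold (f : Int → Int) (ks : List Int) : ∀ (c m : Int),
    (ks.foldl (fun p it => if f it > p.1 then (f it, it) else p) (c, m)).1
      = (ks.map f).foldl max c ∧
    ((ks.foldl (fun p it => if f it > p.1 then (f it, it) else p) (c, m)) = (c, m) ∨
      ((ks.foldl (fun p it => if f it > p.1 then (f it, it) else p) (c, m)).2 ∈ ks ∧
       f (ks.foldl (fun p it => if f it > p.1 then (f it, it) else p) (c, m)).2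
         = (ks.foldl (fun p it => if f it > p.1 then (f it, it) else p) (c, m)).1)) := by
  induction ks with
  | nil => intro c m; simp
  | cons k t ih =>
    intro c m
    simp only [List.foldl_cons, List.map_cons]
    by_cases h : f k > c
    · simp only [if_pos h]
      have hmax : max c (f k) = f k := by omega
      obtain ⟨ih1, ih2⟩ := ih (f k) k
      refine ⟨by rw [ih1, hmax], ?_⟩
      rcases ih2 with heq | ⟨hmem, hval⟩
      · right
        rw [heq]
        exact ⟨List.mem_cons_self, rfl⟩
      · right
        exact ⟨List.mem_cons_of_mem _ hmem, hval⟩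
    · simp only [if_neg h]
      have hmax : max c (f k) = c := by omega
      obtain ⟨ih1, ih2⟩ := ih c m
      refine ⟨by rw [ih1, hmax], ?_⟩
      rcases ih2 with heq | ⟨hmem, hval⟩
      · left; exact heq
      · right; exact ⟨List.mem_cons_of_mem _ hmem, hval⟩

lemma pv_count_argmax (E : List Int) :
    (((E.count ((PySem.Set.ofList E).foldl
        (fun (p : Int × Int) it =>
          if ((E.count it : Nat) : Int) > p.1 then (((E.count it : Nat) : Int), it) else p)
        (-1, -1)).2 : Nat) : Int))
      = pvMc E := by
  cases hE : E with
  | nil => simp [pvMc, PySem.List.maxD, PySem.Set.ofList, PySem.List.max?]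
  | cons e E' =>
    rw [← hE]
    have hne : (PySem.Set.ofList E) ≠ [] := by
      intro hnil
      have : e ∈ PySem.Set.ofList E := by
        rw [PySem.Set.mem_ofList]; rw [hE]; exact List.mem_cons_self
      rw [hnil] at this
      exact absurd this (List.not_mem_nil)
    obtain ⟨k0, kt, hks⟩ := List.exists_cons_of_ne_nil hne
    have hf : ∀ k ∈ PySem.Set.ofList E, (1:Int) ≤ ((E.count k : Nat) : Int) := by
      intro k hk
      rw [PySem.Set.mem_ofList] at hk
      have := List.count_pos_iff.mpr hk
      omega
    obtain ⟨h1, h2⟩ := pv_argmax_fold (fun it => ((E.count it : Nat) : Int)) (PySem.Set.ofList E) (-1) (-1)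
    have hk0 : (1:Int) ≤ ((E.count k0 : Nat) : Int) := hf k0 (by rw [hks]; exact List.mem_cons_self)
    have hmaxd : pvMc E = ((kt.map (fun it => ((E.count it : Nat) : Int))).foldl max ((E.count k0 : Nat) : Int)) := by
      unfold pvMc
      rw [hks, List.map_cons, PySem.List.maxD, PySem.List.max?_id_cons]
      rfl
    have hr1 : (((PySem.Set.ofList E).map (fun it => ((E.count it : Nat) : Int))).foldl max (-1))
        = ((kt.map (fun it => ((E.count it : Nat) : Int))).foldl max ((E.count k0 : Nat) : Int)) := by
      rw [hks, List.map_cons, List.foldl_cons,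
        show max (-1) ((E.count k0 : Nat) : Int) = ((E.count k0 : Nat) : Int) by omega]
    rcases h2 with heq | ⟨_, hval⟩
    · exfalso
      have : ((PySem.Set.ofList E).foldl
          (fun (p : Int × Int) it =>
            if ((E.count it : Nat) : Int) > p.1 then (((E.count it : Nat) : Int), it) else p)
          (-1, -1)).1 = -1 := by rw [heq]
      rw [h1, hr1] at this
      have hle := (PySem.List.le_foldl_max (kt.map (fun it => ((E.count it : Nat) : Int))) ((E.count k0 : Nat) : Int)).1
      omega
    · rw [hval, h1, hr1, hmaxd]

lemma pv_sum_ite_split (c : Int → Bool) (g1 g2 : Int → Int) (l : List Int) :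
    (l.map (fun x => if c x then g1 x else g2 x)).sum
      = ((l.filter c).map g1).sum + ((l.filter (fun x => !(c x))).map g2).sum := by
  induction l with
  | nil => simp
  | cons x t ih =>
    cases h : c x <;> simp [h, ih] <;> ring

lemma pv_sum_ite_ne (l : List Int) (w : Int) :
    (l.map (fun v => if v ≠ w then (1:Int) else 0)).sum = (l.length : Int) - ((l.count w : Nat) : Int) := by
  induction l with
  | nil => simp
  | cons x t ih =>
    simp only [List.map_cons, List.sum_cons, List.length_cons, List.count_cons, ih]
    by_cases h : x = w <;> simp [h] <;> push_cast <;> omega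

lemma pv_sum_ne (x : Int → Int) (r : List Int) (w : Int) :
    (r.map (fun i => if x i ≠ w then (1:Int) else 0)).sum
      = ((r.map x).length : Int) - (((r.map x).count w : Nat) : Int) := by
  have h := pv_sum_ite_ne (r.map x) w
  rw [List.map_map] at h
  simpa [Function.comp] using h

def pvEv (a : List Int) (n : Int) : List Int :=
  (PySem.List.pyRange 0 n 2).map (fun i => PySem.List.pyGetD a i 0)
def pvOd (a : List Int) (n : Int) : List Int :=
  (PySem.List.pyRange 1 n 2).map (fun i => PySem.List.pyGetD a i 0)

lemma pv_pyRange_two_zero_nil (n : Int) (hn : n < 0) : PySem.List.pyRange 0 n 2 = [] := by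
  rw [PySem.List.pyRange_of_pos 0 n (by norm_num : (0:Int) < 2), if_neg (by omega)]
  simp

lemma pv_pyRange_two_one_nil (n : Int) (hn : n < 0) : PySem.List.pyRange 1 n 2 = [] := by
  rw [PySem.List.pyRange_of_pos 1 n (by norm_num : (0:Int) < 2), if_neg (by omega)]
  simp

lemma pv_loop1 (g : Int → Int) (m : Nat) :
    (PySem.List.pyRange 0 (m:Int) 1).foldl
      (fun (s : PySem.Dict Int Int × PySem.Dict Int Int) i =>
        if PySem.Int.mod i 2 == 0 then
          (if !(s.1.contains (g i)) then s.1.insert (g i) 1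
           else s.1.insert (g i) (s.1.getD (g i) 0 + 1), s.2)
        else
          (s.1,
           if !(s.2.contains (g i)) then s.2.insert (g i) 1
           else s.2.insert (g i) (s.2.getD (g i) 0 + 1)))
      (PySem.Dict.empty, PySem.Dict.empty)
    = (PySem.Dict.counter ((PySem.List.pyRange 0 (m:Int) 2).map g),
       PySem.Dict.counter ((PySem.List.pyRange 1 (m:Int) 2).map g)) := by
  have hb : (fun (s : PySem.Dict Int Int × PySem.Dict Int Int) (i : Int) =>
        if PySem.Int.mod i 2 == 0 then
          (if !(s.1.contains (g i)) then s.1.insert (g i) 1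
           else s.1.insert (g i) (s.1.getD (g i) 0 + 1), s.2)
        else
          (s.1,
           if !(s.2.contains (g i)) then s.2.insert (g i) 1
           else s.2.insert (g i) (s.2.getD (g i) 0 + 1)))
      = fun s i =>
        (if PySem.Int.mod i 2 == 0 then s.1.insert (g i) (s.1.getD (g i) 0 + 1) else s.1,
         if !(PySem.Int.mod i 2 == 0) then s.2.insert (g i) (s.2.getD (g i) 0 + 1) else s.2) := by
    funext s i
    by_cases h : (PySem.Int.mod i 2 == 0) = true
    · simp only [h, Bool.not_true, if_true, if_false, pv_upd_eq]
      rfl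
    · have h' : (PySem.Int.mod i 2 == 0) = false := by simpa using h
      simp only [h', Bool.not_false, if_true, if_false, pv_upd_eq]
      rfl
  rw [hb, PySem.List.foldl_prod_mk
    (f := fun (d : PySem.Dict Int Int) (i : Int) =>
      if PySem.Int.mod i 2 == 0 then d.insert (g i) (d.getD (g i) 0 + 1) else d)
    (g := fun (d : PySem.Dict Int Int) (i : Int) =>
      if !(PySem.Int.mod i 2 == 0) then d.insert (g i) (d.getD (g i) 0 + 1) else d)]
  congr 1
  · rw [PySem.List.foldl_if_eq_foldl_filter, pv_filter_even,
      ← PySem.Dict.foldl_insert_getD_add_one_eq_counter, List.foldl_map]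
  · rw [PySem.List.foldl_if_eq_foldl_filter, pv_filter_odd,
      ← PySem.Dict.foldl_insert_getD_add_one_eq_counter, List.foldl_map]

lemma pv_third_fold (g : Int → Int) (me mo : Int) (m : Nat) :
    (PySem.List.pyRange 0 (m:Int) 1).foldl
      (fun res i =>
        if PySem.Int.mod i 2 == 0 then
          (if g i ≠ me then res + 1 else res)
        else
          (if g i ≠ mo then res + 1 else res)) 0
    = ((((PySem.List.pyRange 0 (m:Int) 2).map g).length : Int)
        - ((((PySem.List.pyRange 0 (m:Int) 2).map g).count me : Nat) : Int))
      + ((((PySem.List.pyRange 1 (m:Int) 2).map g).length : Int)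
        - ((((PySem.List.pyRange 1 (m:Int) 2).map g).count mo : Nat) : Int)) := by
  have hb : (fun (res : Int) (i : Int) =>
        if PySem.Int.mod i 2 == 0 then
          (if g i ≠ me then res + 1 else res)
        else
          (if g i ≠ mo then res + 1 else res))
      = fun res i => res +
          (if PySem.Int.mod i 2 == 0 then (if g i ≠ me then (1:Int) else 0)
           else (if g i ≠ mo then (1:Int) else 0)) := by
    funext res i
    split_ifs <;> ring
  rw [hb, PySem.List.foldl_add,
    pv_sum_ite_split (fun i => PySem.Int.mod i 2 == 0)
      (fun i => if g i ≠ me then (1:Int) else 0) (fun i => if g i ≠ mo then (1:Int) else 0),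
    pv_filter_even, pv_filter_odd, pv_sum_ne g _ me, pv_sum_ne g _ mo]
  ring

lemma pv_A_eval (a : List Int) (m : Nat) :
    minReplace a (m:Int)
      = (((pvEv a (m:Int)).length : Int) - pvMc (pvEv a (m:Int)))
        + (((pvOd a (m:Int)).length : Int) - pvMc (pvOd a (m:Int))) := by
  simp only [minReplace]
  rw [pv_loop1]
  simp only [PySem.Dict.keys_counter, PySem.Dict.getD_counter]
  rw [pv_third_fold]
  rw [pv_count_argmax, pv_count_argmax]
  unfold pvEv pvOd
  simp only [List.length_map]

-- ===== B-side lemmas: longest run in a sorted list = maximum multiplicity =====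

-- max over a list of counts, folded over the list itself (perm-friendly form of pvMc)
def pvMx (l : List Int) : Int :=
  (l.map (fun k => ((l.count k : Nat) : Int))).foldl max 0

lemma pv_foldl_max_le (l : List Int) : ∀ d c : Int, d ≤ c → (∀ x ∈ l, x ≤ c) → l.foldl max d ≤ c := by
  induction l with
  | nil => intro d c hd _; simpa using hd
  | cons x t ih =>
    intro d c hd hx
    simp only [List.foldl_cons]
    exact ih _ c (by have := hx x List.mem_cons_self; omega)
      (fun y hy => hx y (List.mem_cons_of_mem _ hy))

lemma pv_foldl_max_congr (l₁ l₂ : List Int) (h : ∀ v, v ∈ l₁ ↔ v ∈ l₂) :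
    l₁.foldl max 0 = l₂.foldl max 0 := by
  have h1 : ∀ (p q : List Int), (∀ v ∈ p, v ∈ q) → p.foldl max 0 ≤ q.foldl max 0 := by
    intro p q hpq
    exact pv_foldl_max_le p 0 _ (PySem.List.le_foldl_max q 0).1
      (fun x hx => (PySem.List.le_foldl_max q 0).2 x (hpq x hx))
  exact le_antisymm (h1 l₁ l₂ (fun v hv => (h v).1 hv)) (h1 l₂ l₁ (fun v hv => (h v).2 hv))

lemma pv_foldl_max_max (l : List Int) : ∀ a b : Int, l.foldl max (max a b) = max a (l.foldl max b) := by
  induction l with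
  | nil => intro a b; simp
  | cons x t ih =>
    intro a b
    simp only [List.foldl_cons]
    rw [max_assoc, ih]

lemma pvMc_eq_pvMx (E : List Int) : pvMc E = pvMx E := by
  cases hE : E with
  | nil => simp [pvMc, pvMx, PySem.List.maxD, PySem.Set.ofList, PySem.List.max?]
  | cons e E' =>
    rw [← hE]
    have hne : (PySem.Set.ofList E) ≠ [] := by
      intro hnil
      have : e ∈ PySem.Set.ofList E := by
        rw [PySem.Set.mem_ofList]; rw [hE]; exact List.mem_cons_self
      rw [hnil] at this
      exact absurd this (List.not_mem_nil)
    obtain ⟨k0, kt, hks⟩ := List.exists_cons_of_ne_nil hne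
    have hk0 : (0:Int) ≤ ((E.count k0 : Nat) : Int) := by positivity
    have hfold : pvMc E
        = (((PySem.Set.ofList E).map (fun k => ((E.count k : Nat) : Int))).foldl max 0) := by
      unfold pvMc
      rw [hks, List.map_cons, PySem.List.maxD, PySem.List.max?_id_cons, List.foldl_cons,
        show max (0:Int) ((E.count k0 : Nat) : Int) = ((E.count k0 : Nat) : Int) by omega]
      rfl
    rw [hfold]
    unfold pvMx
    apply pv_foldl_max_congr
    intro v
    simp only [List.mem_map, PySem.Set.mem_ofList]

lemma pvMx_perm (l₁ l₂ : List Int) (h : l₁.Perm l₂) : pvMx l₁ = pvMx l₂ := by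
  unfold pvMx
  have hc : (fun k => ((l₁.count k : Nat) : Int)) = (fun k => ((l₂.count k : Nat) : Int)) := by
    funext k
    rw [h.count_eq]
  rw [hc]
  exact pv_foldl_max_congr _ _ (fun v => by
    simp only [List.mem_map]
    constructor
    · rintro ⟨k, hk, rfl⟩; exact ⟨k, h.mem_iff.mp hk, rfl⟩
    · rintro ⟨k, hk, rfl⟩; exact ⟨k, h.mem_iff.mpr hk, rfl⟩)

-- pvMx of a block of (j+1) copies of x followed by r not containing x
lemma pvMx_block (x : Int) (j : Nat) (r : List Int) (hx : x ∉ r) :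
    pvMx (List.replicate (j+1) x ++ r) = max ((j+1 : Nat) : Int) (pvMx r) := by
  set m := List.replicate (j+1) x ++ r with hm
  have hcx : m.count x = j + 1 := by
    simp [hm, List.count_append, List.count_replicate, List.count_eq_zero_of_not_mem hx]
  have hcz : ∀ z ∈ r, m.count z = r.count z := by
    intro z hz
    have hzx : z ≠ x := fun h => hx (h ▸ hz)
    simp [hm, List.count_append, List.count_replicate, hzx.symm]
  have hmem : ∀ v, v ∈ m.map (fun k => ((m.count k : Nat) : Int))
      ↔ v ∈ (((j+1 : Nat) : Int) :: r.map (fun k => ((r.count k : Nat) : Int))) := by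
    intro v
    simp only [List.mem_map, List.mem_cons]
    constructor
    · rintro ⟨k, hk, rfl⟩
      rw [hm] at hk
      rcases List.mem_append.mp hk with hk | hk
      · left
        rw [List.eq_of_mem_replicate hk, hcx]
      · right
        exact ⟨k, hk, by rw [hcz k hk]⟩
    · rintro (rfl | ⟨k, hk, rfl⟩)
      · exact ⟨x, by rw [hm]; exact List.mem_append_left _ (List.mem_replicate.mpr ⟨by omega, rfl⟩),
          by rw [hcx]⟩
      · exact ⟨k, by rw [hm]; exact List.mem_append_right _ hk, by rw [hcz k hk]⟩
  unfold pvMx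
  rw [pv_foldl_max_congr _ _ hmem, List.foldl_cons, max_comm (0:Int), pv_foldl_max_max]

-- the best component only serves as a running maximum
lemma pv_lr_best (ys : List Int) : ∀ (b c : Int) (p : Option Int), 0 ≤ b →
    (ys.foldl lrStep (b, c, p)).1 = max b ((ys.foldl lrStep (0, c, p)).1) := by
  induction ys with
  | nil => intro b c p hb; simp; omega
  | cons x t ih =>
    intro b c p hb
    simp only [List.foldl_cons, lrStep]
    set cur := if p = some x then c + 1 else 1 with hcur
    have h1 : (if cur > b then cur else b) = max b cur := by omega
    have h2 : (if cur > (0:Int) then cur else 0) = max 0 cur := by omega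
    rw [h1, h2, ih (max b cur) cur (some x) (by omega), ih (max 0 cur) cur (some x) (by omega)]
    omega

lemma pv_lr_replicate (x : Int) : ∀ (j : Nat) (c : Int), 1 ≤ c →
    (List.replicate j x).foldl lrStep (c, c, some x) = (c + (j:Int), c + (j:Int), some x) := by
  intro j
  induction j with
  | zero => intro c _; simp
  | succ j ih =>
    intro c hc
    rw [List.replicate_succ, List.foldl_cons]
    have hstep : lrStep (c, c, some x) x = (c + 1, c + 1, some x) := by
      simp only [lrStep, if_true]
      rw [if_pos (by omega)]
    rw [hstep, ih (c+1) (by omega)]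
    have hc' : c + 1 + (j:Int) = c + ((j+1 : Nat) : Int) := by push_cast; ring
    rw [hc']

-- in a sorted list, the elements equal to the head form a prefix
lemma pv_sorted_head_block (x : Int) : ∀ (t : List Int), (x :: t).Pairwise (· ≤ ·) →
    ∃ (j : Nat) (r : List Int), t = List.replicate j x ++ r ∧ x ∉ r ∧ r.Pairwise (· ≤ ·) := by
  intro t
  induction t with
  | nil => intro _; exact ⟨0, [], by simp⟩
  | cons y t' ih =>
    intro hp
    have hxt : ∀ z ∈ y :: t', x ≤ z := (List.pairwise_cons.mp hp).1
    have hyt : (y :: t').Pairwise (· ≤ ·) := (List.pairwise_cons.mp hp).2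
    by_cases hyx : y = x
    · subst hyx
      have hp' : (y :: t').Pairwise (· ≤ ·) := hyt
      obtain ⟨j, r, h1, h2, h3⟩ := ih (by
        apply List.pairwise_cons.mpr
        exact ⟨fun z hz => hxt z (List.mem_cons_of_mem _ hz), (List.pairwise_cons.mp hyt).2⟩)
      exact ⟨j + 1, r, by rw [List.replicate_succ, List.cons_append, h1], h2, h3⟩
    · refine ⟨0, y :: t', by simp, ?_, hyt⟩
      intro hmem
      have hxy : x ≤ y := hxt y List.mem_cons_self
      have hxy' : x < y := lt_of_le_of_ne hxy (fun h => hyx h.symm)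
      rcases List.mem_cons.mp hmem with h | h
      · exact hyx h.symm
      · have := (List.pairwise_cons.mp hyt).1 x h
        omega

-- MAIN: in a sorted list the longest run equals the maximum multiplicity
lemma pv_run_sorted : ∀ (N : Nat) (m : List Int), m.length ≤ N → m.Pairwise (· ≤ ·) →
    longestRun m = pvMx m := by
  intro N
  induction N with
  | zero =>
    intro m hlen _
    have : m = [] := List.length_eq_zero_iff.mp (by omega)
    subst this
    simp [longestRun, pvMx]
  | succ N ih =>
    intro m hlen hsort
    cases hm : m with
    | nil => simp [longestRun, pvMx]
    | cons x t =>
      subst hm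
      obtain ⟨j, r, hrep, hxr, hrsort⟩ := pv_sorted_head_block x t hsort
      have hmrep : x :: t = List.replicate (j+1) x ++ r := by
        rw [List.replicate_succ, List.cons_append, hrep]
      -- evaluate the fold over the replicate prefix
      have hpre : (List.replicate (j+1) x).foldl lrStep (0, 0, none)
          = (1 + (j:Int), 1 + (j:Int), some x) := by
        rw [List.replicate_succ, List.foldl_cons]
        have hstep : lrStep ((0:Int), (0:Int), (none : Option Int)) x = (1, 1, some x) := by
          simp [lrStep]
        rw [hstep, pv_lr_replicate x j 1 le_rfl]
      have hLR : longestRun (x :: t) = (r.foldl lrStep (1 + (j:Int), 1 + (j:Int), some x)).1 := by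
        unfold longestRun
        rw [hmrep, List.foldl_append, hpre]
      have hMx : pvMx (x :: t) = max ((j+1 : Nat) : Int) (pvMx r) := by
        rw [hmrep]
        exact pvMx_block x j r hxr
      cases hr : r with
      | nil =>
        subst hr
        rw [hLR, hMx]
        simp [pvMx]
        push_cast
        omega
      | cons y r' =>
        have hyx : y ≠ x := by
          intro h
          exact hxr (by rw [hr, h]; exact List.mem_cons_self)
        have hxy : (some x ≠ some y) := by
          intro h
          injection h with h2
          exact hyx h2.symm
        -- one step into r, cur resets to 1
        have hstep : lrStep (1 + (j:Int), 1 + (j:Int), some x) y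
            = (1 + (j:Int), 1, some y) := by
          simp only [lrStep, if_neg hxy]
          rw [if_neg (by omega)]
        have hstep0 : lrStep ((0:Int), (0:Int), (none : Option Int)) y = (1, 1, some y) := by
          simp [lrStep]
        have hlen' : r.length ≤ N := by
          have h2 : (x :: t).length = (j + 1) + r.length := by
            rw [hmrep, List.length_append, List.length_replicate]
          omega
        have hIH : longestRun r = pvMx r := ih r hlen' hrsort
        have hLRr : longestRun r = max 1 ((r'.foldl lrStep (0, 1, some y)).1) := by
          unfold longestRun
          rw [hr, List.foldl_cons, hstep0, pv_lr_best r' 1 1 (some y) (by omega)]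
        have hfold : (r.foldl lrStep (1 + (j:Int), 1 + (j:Int), some x)).1
            = max (1 + (j:Int)) ((r'.foldl lrStep (0, 1, some y)).1) := by
          rw [hr, List.foldl_cons, hstep, pv_lr_best r' (1 + (j:Int)) 1 (some y) (by omega)]
        rw [hLR, hfold, hMx, ← hIH, hLRr]
        generalize (List.foldl lrStep (0, 1, some y) r').1 = X
        push_cast
        omega

lemma pv_longestRun_sorted (E : List Int) :
    longestRun (PySem.List.sorted E (fun x => x) false) = pvMc E := by
  rw [pv_run_sorted (PySem.List.sorted E (fun x => x) false).length _ le_rfl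
      (by simpa using PySem.List.sorted_pairwise E (fun x => x)),
    pvMx_perm _ E (PySem.List.sorted_perm E (fun x => x) false), pvMc_eq_pvMx]

lemma pv_B_eval (a : List Int) (n : Int) :
    minReplace_alt a n
      = (((pvEv a n).length : Int) - pvMc (pvEv a n))
        + (((pvOd a n).length : Int) - pvMc (pvOd a n)) := by
  simp only [minReplace_alt]
  rw [PySem.List.length_sorted, PySem.List.length_sorted,
    pv_longestRun_sorted, pv_longestRun_sorted]
  rfl

-- ===== VERDICT =====
theorem minReplace_spec : Claim_equal_minReplace := by
  intro a n _dom _pre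
  unfold Spec_minReplace
  rcases (by omega : 0 ≤ n ∨ n < 0) with hn | hn
  · obtain ⟨m, rfl⟩ := Int.eq_ofNat_of_zero_le hn
    rw [pv_A_eval, pv_B_eval]
  · have h1 : PySem.List.pyRange 0 n 1 = [] := PySem.List.pyRange_one_eq_nil (by omega)
    have h2 := pv_pyRange_two_zero_nil n hn
    have h3 := pv_pyRange_two_one_nil n hn
    rw [pv_B_eval]
    unfold pvEv pvOd
    rw [h2, h3]
    simp [minReplace, h1, pvMc, PySem.Set.ofList, PySem.List.maxD, PySem.List.max?,
      PySem.Dict.keys_empty]
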